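-- pv_equiv track=rewrite | github.com/Shiv2157k/leet_code | amazon/dfs_and_bfs/rotting_oranges.py | minutes_took_for_all_to_rot
-- ===== SOURCE A (Python) =====
-- from typing import List
-- from collections import deque
--
-- def minutes_took_for_all_to_rot(grid: List[int]) -> int:
--     """
--     Approach: BFS
--     Time Complexity: O(N)
--     Space Complexity: O(N)
--     :param grid:
--     :return:
--     """
--     rows, cols = len(grid), len(grid[0])
--
--     fresh_oranges = 0
--     # initialize with -1, -1 as delimiter
--     q = deque()
--
--     # step 1: loop through count all the fresh oranges
--     # and add all the grids containing rotten oranges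
--     # into queue
--     for row in range(rows):
--         for col in range(cols):
--             if grid[row][col] == 2:
--                 q.append((row, col))
--             elif grid[row][col] == 1:
--                 fresh_oranges += 1
--
--     # mark the round / level i.e., time stamp
--     q.append((-1, -1))
--
--     # steps 2: start the rotting process
--     minutes_elapsed = -1
--     directions = [(-1, 0), (0, 1), (1, 0), (0, -1)]
--     while q:
--         row, col = q.popleft()
--         if row == -1:
--             # we finished round processing
--             minutes_elapsed += 1
--             if q:  # to avoid endless loop
--                 q.append((-1, -1))
--         else:
--             for r, c in directions:
--                 dr, dc = row + r, col + c
--                 if rows > dr >= 0 and cols > dc >= 0: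
--                     if grid[dr][dc] == 1:
--                         # rot this orange
--                         grid[dr][dc] = 2
--                         fresh_oranges -= 1
--                         q.append((dr, dc))
--     return minutes_elapsed if not fresh_oranges else -1
-- ===== SOURCE B (Python) =====
-- def minutes_took_for_all_to_rot(grid):
--     """Round-by-round full-grid rewrite instead of a BFS queue: each minute,
--     collect every fresh cell that touches a rotten one, then rot them all at once."""
--     rows, cols = len(grid), len(grid[0])
--
--     fresh = 0
--     for r in range(rows):
--         for c in range(cols):
--             if grid[r][c] == 1:
--                 fresh += 1
--
--     minutes = 0
--     while True:
--         newly = [(r, c)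
--                  for r in range(rows)
--                  for c in range(cols)
--                  if grid[r][c] == 1 and any(
--                      0 <= r + dr < rows and 0 <= c + dc < cols and grid[r + dr][c + dc] == 2
--                      for dr, dc in ((-1, 0), (0, 1), (1, 0), (0, -1)))]
--         if not newly:
--             break
--         for r, c in newly:
--             grid[r][c] = 2
--         fresh -= len(newly)
--         minutes += 1
--     return minutes if not fresh else -1
-- ===== Notes on version B (the rewrite author's own statement) =====
-- stated objective: alternative
-- what changed: Replaces A's deque-with-sentinel BFS by a minute-by-minute simulation: each round does a full grid scan collecting every fresh cell with a rotten neighbour, then rots them all at once; no queue, no sentinel.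
-- outside the precondition, e.g. on minutes_took_for_all_to_rot([]): A raises IndexError, B raises IndexError; on minutes_took_for_all_to_rot([[1, 2], [1]]): A raises IndexError, B raises IndexError
import Mathlib
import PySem

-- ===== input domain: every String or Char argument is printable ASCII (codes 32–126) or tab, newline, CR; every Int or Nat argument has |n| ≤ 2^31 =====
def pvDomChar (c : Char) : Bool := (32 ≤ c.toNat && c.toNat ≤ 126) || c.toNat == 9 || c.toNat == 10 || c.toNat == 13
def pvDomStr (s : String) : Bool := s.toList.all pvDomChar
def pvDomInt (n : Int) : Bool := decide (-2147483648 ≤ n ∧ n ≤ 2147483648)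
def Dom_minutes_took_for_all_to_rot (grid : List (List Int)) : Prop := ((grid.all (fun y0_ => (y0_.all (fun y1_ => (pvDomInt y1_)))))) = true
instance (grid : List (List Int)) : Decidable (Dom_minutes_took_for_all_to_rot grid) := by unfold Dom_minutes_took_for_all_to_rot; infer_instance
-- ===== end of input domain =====

-- B replaces A's deque-with-sentinel BFS by a minute-by-minute full-grid rewrite (alternative decomposition,
-- same results).  Both Pythons mutate `grid` in place identically; the theorems below are about the return value.

-- ===== PORT A =====
def getCell (g : List (List Int)) (r c : Int) : Int :=
  PySem.List.pyGetD (PySem.List.pyGetD g r []) c 0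

def setCell (g : List (List Int)) (r c : Int) (v : Int) : List (List Int) :=
  g.set r.toNat ((g.getD r.toNat []).set c.toNat v)

def rotDirections : List (Int × Int) := [(-1, 0), (0, 1), (1, 0), (0, -1)]

-- step 1 of A: count fresh oranges and queue the rotten ones (row-major double loop)
def scanInitA (g : List (List Int)) (rows cols : Int) : List (Int × Int) × Int :=
  (PySem.List.pyRange 0 rows 1).foldl (fun acc row =>
    (PySem.List.pyRange 0 cols 1).foldl (fun (acc : List (Int × Int) × Int) col =>
      if getCell g row col = 2 then (acc.1 ++ [(row, col)], acc.2)
      else if getCell g row col = 1 then (acc.1, acc.2 + 1) else acc) acc) ([], 0)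

-- body of A's `for r, c in directions` loop; state = (grid, fresh, queue-after-the-popped-cell)
def stepDir (rows cols row col : Int) (s : List (List Int) × Int × List (Int × Int))
    (d : Int × Int) : List (List Int) × Int × List (Int × Int) :=
  let dr := row + d.1
  let dc := col + d.2
  if rows > dr ∧ dr ≥ 0 ∧ cols > dc ∧ dc ≥ 0 then
    if getCell s.1 dr dc = 1 then (setCell s.1 dr dc 2, s.2.1 - 1, s.2.2 ++ [(dr, dc)])
    else s
  else s

-- A's `while q` loop; fuel is a totality guard only (proved sufficient below)
def rotLoopA (fuel : Nat) (q : List (Int × Int)) (g : List (List Int))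
    (fresh minutes rows cols : Int) : Int :=
  match fuel, q with
  | _, [] => if fresh = 0 then minutes else -1
  | 0, _ => if fresh = 0 then minutes else -1
  | fuel + 1, (row, col) :: rest =>
      if row = -1 then
        if rest ≠ [] then rotLoopA fuel (rest ++ [(-1, -1)]) g fresh (minutes + 1) rows cols
        else rotLoopA fuel rest g fresh (minutes + 1) rows cols
      else
        let s := rotDirections.foldl (stepDir rows cols row col) (g, fresh, rest)
        rotLoopA fuel s.2.2 s.1 s.2.1 minutes rows cols

def minutes_took_for_all_to_rot (grid : List (List Int)) : Int :=
  let rows : Int := grid.length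
  let cols : Int := (PySem.List.pyGetD grid 0 []).length
  let init := scanInitA grid rows cols
  let q := init.1 ++ [((-1 : Int), (-1 : Int))]
  rotLoopA (2 * grid.length * (PySem.List.pyGetD grid 0 []).length + q.length + 2)
    q grid init.2 (-1) rows cols

-- ===== PORT B =====
-- is (r, c) a fresh cell with a rotten in-bounds neighbour?
def freshNbr (g : List (List Int)) (rows cols r c : Int) : Bool :=
  (getCell g r c == 1) && rotDirections.any (fun d =>
    decide (0 ≤ r + d.1 ∧ r + d.1 < rows ∧ 0 ≤ c + d.2 ∧ c + d.2 < cols) &&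
    (getCell g (r + d.1) (c + d.2) == 2))

-- B's round scan: the list comprehension collecting all cells to rot this minute
def scanNewly (g : List (List Int)) (rows cols : Int) : List (Int × Int) :=
  (PySem.List.pyRange 0 rows 1).flatMap (fun r =>
    ((PySem.List.pyRange 0 cols 1).filter (fun c => freshNbr g rows cols r c)).map (fun c => (r, c)))

def rotAll (g : List (List Int)) (L : List (Int × Int)) : List (List Int) :=
  L.foldl (fun g p => setCell g p.1 p.2 2) g

def scanFreshB (g : List (List Int)) (rows cols : Int) : Int :=
  (PySem.List.pyRange 0 rows 1).foldl (fun f r =>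
    (PySem.List.pyRange 0 cols 1).foldl (fun f c => if getCell g r c = 1 then f + 1 else f) f) 0

-- B's `while True` loop; fuel is a totality guard only (each taken round rots ≥ 1 fresh cell)
def rotLoopB (fuel : Nat) (g : List (List Int)) (fresh minutes rows cols : Int) : Int :=
  match fuel with
  | 0 => if fresh = 0 then minutes else -1
  | fuel + 1 =>
      let newly := scanNewly g rows cols
      if newly = [] then (if fresh = 0 then minutes else -1)
      else rotLoopB fuel (rotAll g newly) (fresh - (newly.length : Int)) (minutes + 1) rows cols

def minutes_took_for_all_to_rot_alt (grid : List (List Int)) : Int :=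
  let rows : Int := grid.length
  let cols : Int := (PySem.List.pyGetD grid 0 []).length
  let fresh := scanFreshB grid rows cols
  rotLoopB (fresh.toNat + 1) grid fresh 0 rows cols

-- ===== PRECONDITION & SPEC =====
-- Pre_ excludes exactly the grids on which Python A raises IndexError: the empty grid (grid[0])
-- and ragged grids with a row shorter than row 0 (step-1 scan indexes every row up to len(grid[0])).
def Pre_minutes_took_for_all_to_rot (grid : List (List Int)) : Prop :=
  grid ≠ [] ∧ ∀ row ∈ grid, (grid.headD []).length ≤ row.length
instance (grid : List (List Int)) : Decidable (Pre_minutes_took_for_all_to_rot grid) := by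
  unfold Pre_minutes_took_for_all_to_rot; infer_instance

def pvWitness_minutes_took_for_all_to_rot : List (List Int) := [[2, 1, 0], [1, 1, 0]]

def Spec_minutes_took_for_all_to_rot (grid : List (List Int)) (out : Int) : Prop :=
  out = minutes_took_for_all_to_rot_alt grid
instance (grid : List (List Int)) (out : Int) : Decidable (Spec_minutes_took_for_all_to_rot grid out) := by
  unfold Spec_minutes_took_for_all_to_rot; infer_instance

-- ===== CLAIM (what is proved, stated in full; the proofs are below) =====
def Claim_equal_minutes_took_for_all_to_rot : Prop :=
  ∀ (grid : List (List Int)), Dom_minutes_took_for_all_to_rot grid →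
    Pre_minutes_took_for_all_to_rot grid →
    Spec_minutes_took_for_all_to_rot grid (minutes_took_for_all_to_rot grid)

-- ===== LEMMAS AND PROOFS =====

-- in-bounds positions, the rectangular shape invariant, pointwise grid agreement, fresh count
def inb (rows cols : Int) (p : Int × Int) : Prop :=
  0 ≤ p.1 ∧ p.1 < rows ∧ 0 ≤ p.2 ∧ p.2 < cols

def Shape (rows cols : Int) (g : List (List Int)) : Prop :=
  (g.length : Int) = rows ∧ ∀ row ∈ g, cols ≤ (row.length : Int)

def adjd (q p : Int × Int) : Prop := ∃ d ∈ rotDirections, p = (q.1 + d.1, q.2 + d.2)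

def posL (rows cols : Int) : List (Int × Int) :=
  (PySem.List.pyRange 0 rows 1).flatMap (fun r => (PySem.List.pyRange 0 cols 1).map (fun c => (r, c)))

def onesG (rows cols : Int) (g : List (List Int)) : Nat :=
  (posL rows cols).countP (fun p => getCell g p.1 p.2 == 1)

def EqOn (rows cols : Int) (gA gB : List (List Int)) : Prop :=
  ∀ p, inb rows cols p → getCell gA p.1 p.2 = getCell gB p.1 p.2

lemma mem_posL (rows cols : Int) (p : Int × Int) : p ∈ posL rows cols ↔ inb rows cols p := by
  simp only [posL, inb, List.mem_flatMap, List.mem_map, PySem.List.mem_pyRange_one]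
  constructor
  · rintro ⟨r, ⟨h1, h2⟩, c, ⟨h3, h4⟩, rfl⟩; exact ⟨h1, h2, h3, h4⟩
  · rintro ⟨h1, h2, h3, h4⟩; exact ⟨p.1, ⟨h1, h2⟩, p.2, ⟨h3, h4⟩, rfl⟩

lemma nodup_posL (rows cols : Int) : (posL rows cols).Nodup := by
  rw [posL, List.nodup_flatMap]
  constructor
  · intro r _
    exact ((PySem.List.nodup_pyRange_one 0 cols).map (fun a b h => by simpa using congrArg Prod.snd h))
  · refine (PySem.List.nodup_pyRange_one 0 rows).imp ?_
    intro a b hab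
    intro x hx hy
    simp only [Function.onFun, List.mem_map] at hx hy
    obtain ⟨c1, _, rfl⟩ := hx
    obtain ⟨c2, _, h⟩ := hy
    exact absurd (by simpa using congrArg Prod.fst h.symm) hab

lemma getCell_nonneg (g : List (List Int)) (r c : Int) (hr : 0 ≤ r) (hc : 0 ≤ c) :
    getCell g r c = (g.getD r.toNat []).getD c.toNat 0 := by
  have hr' : r = ((r.toNat : Nat) : Int) := (Int.toNat_of_nonneg hr).symm
  have hc' : c = ((c.toNat : Nat) : Int) := (Int.toNat_of_nonneg hc).symm
  rw [getCell, hr', hc', PySem.List.pyGetD_natCast, PySem.List.pyGetD_natCast,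
    Int.toNat_natCast, Int.toNat_natCast]

lemma shape_setCell (rows cols : Int) (g : List (List Int)) (r c v : Int)
    (hS : Shape rows cols g) : Shape rows cols (setCell g r c v) := by
  obtain ⟨hlen, hrow⟩ := hS
  by_cases hlt : r.toNat < g.length
  · refine ⟨by simpa [setCell] using hlen, ?_⟩
    intro row hmem
    rcases List.mem_or_eq_of_mem_set hmem with h | h
    · exact hrow _ h
    · subst h
      have hg : g.getD r.toNat [] = g[r.toNat] := List.getD_eq_getElem g [] hlt
      rw [hg]
      simpa using hrow _ (List.getElem_mem hlt)
  · rw [setCell, List.set_eq_of_length_le (by omega)]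
    exact ⟨hlen, hrow⟩

lemma getCell_setCell (rows cols : Int) (g : List (List Int)) (r c r' c' v : Int)
    (hS : Shape rows cols g) (h : inb rows cols (r, c)) (hr' : 0 ≤ r') (hc' : 0 ≤ c') :
    getCell (setCell g r c v) r' c' = if r' = r ∧ c' = c then v else getCell g r' c' := by
  obtain ⟨hlen, hrow⟩ := hS
  obtain ⟨h1, h2, h3, h4⟩ := h
  simp only at h1 h2 h3 h4
  have hrN : r.toNat < g.length := by omega
  have hcN : c.toNat < (g[r.toNat]).length := by
    have := hrow _ (List.getElem_mem hrN)
    omega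
  have hgD : g.getD r.toNat [] = g[r.toNat] := List.getD_eq_getElem g [] hrN
  rw [getCell_nonneg (setCell g r c v) r' c' hr' hc', getCell_nonneg g r' c' hr' hc',
    setCell, hgD]
  by_cases hR : r' = r
  · subst hR
    have houter : (g.set r'.toNat (g[r'.toNat].set c.toNat v)).getD r'.toNat []
        = g[r'.toNat].set c.toNat v := by
      rw [List.getD_eq_getElem?_getD, List.getElem?_set_self (by simpa using hrN)]
      rfl
    rw [houter]
    by_cases hC : c' = c
    · subst hC
      simp [List.getD_eq_getElem?_getD, List.getElem?_set_self hcN]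
    · have hcc : c.toNat ≠ c'.toNat := by omega
      simp [List.getD_eq_getElem?_getD, List.getElem?_set_ne hcc, hC,
        List.getElem?_eq_getElem hrN]
  · have hrr : r.toNat ≠ r'.toNat := by omega
    have houter : (g.set r.toNat (g[r.toNat].set c.toNat v)).getD r'.toNat []
        = g.getD r'.toNat [] := by
      rw [List.getD_eq_getElem?_getD, List.getElem?_set_ne hrr, List.getD_eq_getElem?_getD]
    rw [houter]
    simp [hR]

lemma rotAll_spec (rows cols : Int) (L : List (Int × Int)) (g : List (List Int))
    (hS : Shape rows cols g) (hL : ∀ p ∈ L, inb rows cols p) :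
    Shape rows cols (rotAll g L) ∧
    ∀ p : Int × Int, 0 ≤ p.1 → 0 ≤ p.2 →
      getCell (rotAll g L) p.1 p.2 = if p ∈ L then 2 else getCell g p.1 p.2 := by
  induction L generalizing g with
  | nil => exact ⟨hS, by intro p _ _; simp [rotAll]⟩
  | cons x L ih =>
    have hxin : inb rows cols x := hL x (List.mem_cons_self)
    have hS1 := shape_setCell rows cols g x.1 x.2 2 hS
    obtain ⟨hSh, hchar⟩ := ih (setCell g x.1 x.2 2) hS1 (fun p hp => hL p (List.mem_cons_of_mem _ hp))
    have hrot : rotAll g (x :: L) = rotAll (setCell g x.1 x.2 2) L := by simp [rotAll]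
    refine ⟨by rw [hrot]; exact hSh, ?_⟩
    intro p hp1 hp2
    have hset := getCell_setCell rows cols g x.1 x.2 p.1 p.2 2 hS (by simpa using hxin) hp1 hp2
    rw [hrot, hchar p hp1 hp2, hset]
    by_cases hmem : p ∈ L
    · simp [hmem]
    · by_cases hx : p = x
      · subst hx; simp [hmem]
      · have : ¬(p.1 = x.1 ∧ p.2 = x.2) := by
          intro hh; exact hx (Prod.ext hh.1 hh.2)
        simp [hmem, hx, this]

-- counting: flipping exactly the (nodup) cells of N from 1 to 2 drops the fresh count by N.length
lemma onesG_flip (rows cols : Int) (g g' : List (List Int)) (N : List (Int × Int))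
    (hN : N.Nodup) (hNmem : ∀ p ∈ N, inb rows cols p ∧ getCell g p.1 p.2 = 1)
    (hchar : ∀ p, inb rows cols p →
      getCell g' p.1 p.2 = if p ∈ N then 2 else getCell g p.1 p.2) :
    onesG rows cols g' + N.length = onesG rows cols g := by
  have key : ∀ (P : List (Int × Int)), (∀ p ∈ P, inb rows cols p) →
      P.countP (fun p => getCell g' p.1 p.2 == 1) + P.countP (fun p => decide (p ∈ N))
        = P.countP (fun p => getCell g p.1 p.2 == 1) := by
    intro P
    induction P with
    | nil => simp
    | cons a P ih =>
      intro hP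
      have ha : inb rows cols a := hP a List.mem_cons_self
      have htl := ih (fun p hp => hP p (List.mem_cons_of_mem _ hp))
      by_cases hmem : a ∈ N
      · have h1 : getCell g a.1 a.2 = 1 := (hNmem a hmem).2
        have h2 : getCell g' a.1 a.2 = 2 := by rw [hchar a ha]; simp [hmem]
        simp only [List.countP_cons, h1, h2, hmem]
        norm_num
        omega
      · have h2 : getCell g' a.1 a.2 = getCell g a.1 a.2 := by rw [hchar a ha]; simp [hmem]
        simp only [List.countP_cons, h2, hmem]
        norm_num
        omega
  have hNlen : (posL rows cols).countP (fun p => decide (p ∈ N)) = N.length := by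
    rw [List.countP_eq_length_filter]
    have hperm : ((posL rows cols).filter (fun p => decide (p ∈ N))).Perm N := by
      refine (List.perm_ext_iff_of_nodup ((nodup_posL rows cols).filter _) hN).mpr ?_
      intro x
      simp only [List.mem_filter, decide_eq_true_eq]
      constructor
      · exact fun h => h.2
      · intro hx
        exact ⟨(mem_posL rows cols x).mpr (hNmem x hx).1, hx⟩
    exact hperm.length_eq
  have := key (posL rows cols) (fun p hp => (mem_posL rows cols p).mp hp)
  rw [hNlen] at this
  simpa [onesG] using this

-- A's step-1 scan: the queue is exactly the in-bounds rotten cells, fresh = onesG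
lemma foldPos_spec (g : List (List Int)) :
    ∀ (P : List (Int × Int)) (q : List (Int × Int)) (f : Int),
    P.foldl (fun (acc : List (Int × Int) × Int) p =>
        if getCell g p.1 p.2 = 2 then (acc.1 ++ [p], acc.2)
        else if getCell g p.1 p.2 = 1 then (acc.1, acc.2 + 1) else acc) (q, f)
      = (q ++ P.filter (fun p => getCell g p.1 p.2 == 2),
         f + (P.countP (fun p => getCell g p.1 p.2 == 1) : Int)) := by
  intro P
  induction P with
  | nil => intro q f; simp
  | cons p P ih =>
    intro q f
    by_cases h2 : getCell g p.1 p.2 = 2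
    · simp only [List.foldl_cons, h2, if_pos rfl, ih, List.filter_cons, List.countP_cons]
      simp [h2]
    · by_cases h1 : getCell g p.1 p.2 = 1
      · simp only [List.foldl_cons, h2, h1, if_neg h2, if_pos rfl, ih, List.filter_cons,
          List.countP_cons]
        simp [h1, h2]
        omega
      · simp only [List.foldl_cons, if_neg h2, if_neg h1, ih, List.filter_cons, List.countP_cons]
        simp [h1, h2]

lemma scanInitA_eq (g : List (List Int)) (rows cols : Int) :
    scanInitA g rows cols
      = ((posL rows cols).filter (fun p => getCell g p.1 p.2 == 2), (onesG rows cols g : Int)) := by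
  have : scanInitA g rows cols
      = (posL rows cols).foldl (fun (acc : List (Int × Int) × Int) p =>
          if getCell g p.1 p.2 = 2 then (acc.1 ++ [p], acc.2)
          else if getCell g p.1 p.2 = 1 then (acc.1, acc.2 + 1) else acc) ([], 0) := by
    rw [scanInitA, posL, List.foldl_flatMap]
    simp only [List.foldl_map]
  rw [this, foldPos_spec]
  simp [onesG]

lemma scanInitA_spec (rows cols : Int) (g : List (List Int)) :
    (∀ p, p ∈ (scanInitA g rows cols).1 ↔ inb rows cols p ∧ getCell g p.1 p.2 = 2) ∧
    (scanInitA g rows cols).2 = (onesG rows cols g : Int) := by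
  rw [scanInitA_eq]
  refine ⟨?_, rfl⟩
  intro p
  simp [List.mem_filter, mem_posL]

lemma scanFreshB_spec (rows cols : Int) (g : List (List Int)) :
    scanFreshB g rows cols = (onesG rows cols g : Int) := by
  have key : ∀ (P : List (Int × Int)) (f : Int),
      P.foldl (fun f p => if getCell g p.1 p.2 = 1 then f + 1 else f) f
        = f + (P.countP (fun p => getCell g p.1 p.2 == 1) : Int) := by
    intro P
    induction P with
    | nil => intro f; simp
    | cons p P ih =>
      intro f
      by_cases h1 : getCell g p.1 p.2 = 1
      · simp only [List.foldl_cons, if_pos h1, ih, List.countP_cons]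
        simp [h1]; omega
      · simp only [List.foldl_cons, if_neg h1, ih, List.countP_cons]
        simp [h1]
  have : scanFreshB g rows cols
      = (posL rows cols).foldl (fun f p => if getCell g p.1 p.2 = 1 then f + 1 else f) 0 := by
    rw [scanFreshB, posL, List.foldl_flatMap]
    simp only [List.foldl_map]
  rw [this, key]
  simp [onesG]

lemma mem_scanNewly (rows cols : Int) (g : List (List Int)) (p : Int × Int) :
    p ∈ scanNewly g rows cols ↔
      inb rows cols p ∧ getCell g p.1 p.2 = 1 ∧
      ∃ d ∈ rotDirections, inb rows cols (p.1 + d.1, p.2 + d.2) ∧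
        getCell g (p.1 + d.1) (p.2 + d.2) = 2 := by
  simp only [scanNewly, List.mem_flatMap, List.mem_map, List.mem_filter,
    PySem.List.mem_pyRange_one, freshNbr, Bool.and_eq_true, beq_iff_eq, decide_eq_true_eq,
    List.any_eq_true, inb]
  constructor
  · rintro ⟨r, ⟨hr0, hr1⟩, c, ⟨⟨⟨hc0, hc1⟩, h1, d, hd, hb, h2⟩, rfl⟩⟩
    exact ⟨⟨hr0, hr1, hc0, hc1⟩, h1, d, hd, hb, h2⟩
  · rintro ⟨⟨hr0, hr1, hc0, hc1⟩, h1, d, hd, hb, h2⟩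
    exact ⟨p.1, ⟨hr0, hr1⟩, p.2, ⟨⟨hc0, hc1⟩, h1, d, hd, hb, h2⟩, rfl⟩

lemma nodup_scanNewly (rows cols : Int) (g : List (List Int)) :
    (scanNewly g rows cols).Nodup := by
  rw [scanNewly, List.nodup_flatMap]
  constructor
  · intro r _
    exact (((PySem.List.nodup_pyRange_one 0 cols).filter _).map
      (fun a b h => by simpa using congrArg Prod.snd h))
  · refine (PySem.List.nodup_pyRange_one 0 rows).imp ?_
    intro a b hab x hx hy
    simp only [List.mem_map, List.mem_filter] at hx hy
    obtain ⟨c1, _, rfl⟩ := hx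
    obtain ⟨c2, _, h⟩ := hy
    exact absurd (by simpa using congrArg Prod.fst h.symm) hab

-- processing the four directions of one popped cell (x = (row, col))
lemma foldDirs_spec (rows cols row col : Int) :
    ∀ (D : List (Int × Int)) (g : List (List Int)) (f : Int) (acc : List (Int × Int)),
    Shape rows cols g →
    ∃ (g' : List (List Int)) (A : List (Int × Int)),
      D.foldl (stepDir rows cols row col) (g, f, acc) = (g', f - (A.length : Int), acc ++ A) ∧
      A.Nodup ∧ Shape rows cols g' ∧
      (∀ p : Int × Int, p ∈ A ↔ inb rows cols p ∧ getCell g p.1 p.2 = 1 ∧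
        ∃ d ∈ D, p = (row + d.1, col + d.2)) ∧
      (∀ p : Int × Int, inb rows cols p →
        ((getCell g p.1 p.2 = 1 ∧ ∃ d ∈ D, p = (row + d.1, col + d.2)) →
          getCell g' p.1 p.2 = 2) ∧
        (¬ (getCell g p.1 p.2 = 1 ∧ ∃ d ∈ D, p = (row + d.1, col + d.2)) →
          getCell g' p.1 p.2 = getCell g p.1 p.2)) := by
  intro D
  induction D with
  | nil =>
    intro g f acc hS
    refine ⟨g, [], by simp, List.nodup_nil, hS, ?_, ?_⟩
    · intro p
      constructor
      · intro h; simp at h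
      · rintro ⟨_, _, d, hd, _⟩; simp at hd
    · intro p _
      refine ⟨?_, fun _ => rfl⟩
      rintro ⟨_, d, hd, _⟩
      simp at hd
  | cons d D ih =>
    intro g f acc hS
    set nr := row + d.1 with hnr
    set nc := col + d.2 with hnc
    have hstep : (d :: D).foldl (stepDir rows cols row col) (g, f, acc)
        = D.foldl (stepDir rows cols row col) (stepDir rows cols row col (g, f, acc) d) := by
      simp
    by_cases hbnd : rows > nr ∧ nr ≥ 0 ∧ cols > nc ∧ nc ≥ 0
    · have hinbx : inb rows cols (nr, nc) := ⟨hbnd.2.1, hbnd.1, hbnd.2.2.2, hbnd.2.2.1⟩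
      by_cases h1 : getCell g nr nc = 1
      · -- this direction rots (nr, nc)
        have hstep1 : stepDir rows cols row col (g, f, acc) d
            = (setCell g nr nc 2, f - 1, acc ++ [(nr, nc)]) := by
          rw [stepDir]
          simp only [← hnr, ← hnc]
          rw [if_pos hbnd, if_pos h1]
        have hS1 : Shape rows cols (setCell g nr nc 2) := shape_setCell _ _ _ _ _ _ hS
        obtain ⟨g', A', heq, hnd, hS', hmem, hchar⟩ := ih (setCell g nr nc 2) (f - 1) (acc ++ [(nr, nc)]) hS1
        have hg1 : ∀ p : Int × Int, inb rows cols p →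
            getCell (setCell g nr nc 2) p.1 p.2
              = if p.1 = nr ∧ p.2 = nc then 2 else getCell g p.1 p.2 := by
          intro p hp
          exact getCell_setCell rows cols g nr nc p.1 p.2 2 hS hinbx hp.1 hp.2.2.1
        have hxA' : (nr, nc) ∉ A' := by
          intro hmem'
          have := (hmem _).mp hmem'
          rw [hg1 _ this.1] at this
          simp at this
        refine ⟨g', (nr, nc) :: A', ?_, ?_, hS', ?_, ?_⟩
        · rw [hstep, hstep1, heq]
          have h2' : (acc ++ [(nr, nc)]) ++ A' = acc ++ ((nr, nc) :: A') := by simp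
          rw [h2']
          have h1' : f - 1 - (A'.length : Int) = f - (((nr, nc) :: A').length : Int) := by
            simp only [List.length_cons]
            push_cast
            ring
          rw [h1']
        · exact List.nodup_cons.mpr ⟨hxA', hnd⟩
        · intro p
          constructor
          · intro hp
            rcases List.mem_cons.mp hp with rfl | hp'
            · exact ⟨hinbx, h1, d, List.mem_cons_self, rfl⟩
            · obtain ⟨hpi, hpv, d', hd', hpd⟩ := (hmem p).mp hp'
              have hpx : p ≠ (nr, nc) := by
                rintro rfl
                rw [hg1 _ hpi] at hpv
                simp at hpv
              rw [hg1 _ hpi] at hpv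
              have : ¬(p.1 = nr ∧ p.2 = nc) := by
                intro hh; exact hpx (Prod.ext hh.1 hh.2)
              rw [if_neg this] at hpv
              exact ⟨hpi, hpv, d', List.mem_cons_of_mem _ hd', hpd⟩
          · rintro ⟨hpi, hpv, d', hd', hpd⟩
            by_cases hpx : p = (nr, nc)
            · exact hpx ▸ List.mem_cons_self
            · refine List.mem_cons_of_mem _ ((hmem p).mpr ⟨hpi, ?_, ?_⟩)
              · rw [hg1 _ hpi, if_neg (by intro hh; exact hpx (Prod.ext hh.1 hh.2))]
                exact hpv
              · rcases List.mem_cons.mp hd' with rfl | hd''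
                · exact absurd (by rw [hpd]) hpx
                · exact ⟨d', hd'', hpd⟩
        · intro p hpi
          have hcp := hchar p hpi
          by_cases hpx : p = (nr, nc)
          · subst hpx
            have hg1x : getCell (setCell g nr nc 2) nr nc = 2 := by
              rw [hg1 _ hinbx]; simp
            have hnotc : ¬(getCell (setCell g nr nc 2) nr nc = 1 ∧
                ∃ d' ∈ D, ((nr : Int), (nc : Int)) = (row + d'.1, col + d'.2)) := by
              rw [hg1x]; rintro ⟨h, _⟩; exact absurd h (by norm_num)
            have := hcp.2 hnotc
            rw [hg1x] at this
            exact ⟨fun _ => this, fun hn => absurd ⟨h1, d, List.mem_cons_self, rfl⟩ hn⟩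
          · have hne : ¬(p.1 = nr ∧ p.2 = nc) := by
              intro hh; exact hpx (Prod.ext hh.1 hh.2)
            have hg1p : getCell (setCell g nr nc 2) p.1 p.2 = getCell g p.1 p.2 := by
              rw [hg1 _ hpi, if_neg hne]
            constructor
            · rintro ⟨hpv, d', hd', hpd⟩
              rcases List.mem_cons.mp hd' with rfl | hd''
              · exact absurd (by rw [hpd]) hpx
              · exact hcp.1 ⟨by rw [hg1p]; exact hpv, d', hd'', hpd⟩
            · intro hn
              have : ¬(getCell (setCell g nr nc 2) p.1 p.2 = 1 ∧
                  ∃ d' ∈ D, p = (row + d'.1, col + d'.2)) := by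
                rintro ⟨hv, d', hd', hpd⟩
                exact hn ⟨by rw [← hg1p]; exact hv, d', List.mem_cons_of_mem _ hd', hpd⟩
              rw [← hg1p]
              exact hcp.2 this
      · -- in bounds but not fresh: no change
        have hstep1 : stepDir rows cols row col (g, f, acc) d = (g, f, acc) := by
          rw [stepDir]
          simp only [← hnr, ← hnc]
          rw [if_pos hbnd, if_neg h1]
        obtain ⟨g', A', heq, hnd, hS', hmem, hchar⟩ := ih g f acc hS
        refine ⟨g', A', by rw [hstep, hstep1]; exact heq, hnd, hS', ?_, ?_⟩
        · intro p
          rw [hmem p]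
          constructor
          · rintro ⟨hpi, hpv, d', hd', hpd⟩
            exact ⟨hpi, hpv, d', List.mem_cons_of_mem _ hd', hpd⟩
          · rintro ⟨hpi, hpv, d', hd', hpd⟩
            rcases List.mem_cons.mp hd' with rfl | hd''
            · rw [hpd] at hpv; exact absurd hpv h1
            · exact ⟨hpi, hpv, d', hd'', hpd⟩
        · intro p hpi
          have hcp := hchar p hpi
          constructor
          · rintro ⟨hpv, d', hd', hpd⟩
            rcases List.mem_cons.mp hd' with rfl | hd''
            · rw [hpd] at hpv; exact absurd hpv h1
            · exact hcp.1 ⟨hpv, d', hd'', hpd⟩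
          · intro hn
            exact hcp.2 (by
              rintro ⟨hpv, d', hd', hpd⟩
              exact hn ⟨hpv, d', List.mem_cons_of_mem _ hd', hpd⟩)
    · -- neighbour out of bounds: no change
      have hstep1 : stepDir rows cols row col (g, f, acc) d = (g, f, acc) := by
        rw [stepDir]
        simp only [← hnr, ← hnc]
        rw [if_neg hbnd]
      have hnin : ∀ p : Int × Int, inb rows cols p → p ≠ (nr, nc) := by
        rintro p hp rfl
        exact hbnd ⟨hp.2.1, hp.1, hp.2.2.2, hp.2.2.1⟩
      obtain ⟨g', A', heq, hnd, hS', hmem, hchar⟩ := ih g f acc hS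
      refine ⟨g', A', by rw [hstep, hstep1]; exact heq, hnd, hS', ?_, ?_⟩
      · intro p
        rw [hmem p]
        constructor
        · rintro ⟨hpi, hpv, d', hd', hpd⟩
          exact ⟨hpi, hpv, d', List.mem_cons_of_mem _ hd', hpd⟩
        · rintro ⟨hpi, hpv, d', hd', hpd⟩
          rcases List.mem_cons.mp hd' with rfl | hd''
          · exact absurd hpd (hnin p hpi)
          · exact ⟨hpi, hpv, d', hd'', hpd⟩
      · intro p hpi
        have hcp := hchar p hpi
        constructor
        · rintro ⟨hpv, d', hd', hpd⟩
          rcases List.mem_cons.mp hd' with rfl | hd''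
          · exact absurd hpd (hnin p hpi)
          · exact hcp.1 ⟨hpv, d', hd'', hpd⟩
        · intro hn
          exact hcp.2 (by
            rintro ⟨hpv, d', hd', hpd⟩
            exact hn ⟨hpv, d', List.mem_cons_of_mem _ hd', hpd⟩)

-- processing the whole non-sentinel prefix of the queue (one BFS round)
lemma processRound (rows cols : Int) :
    ∀ (Q : List (Int × Int)) (g : List (List Int)) (f m : Int)
      (tail : List (Int × Int)) (fuel : Nat),
    Shape rows cols g → (∀ p ∈ Q, inb rows cols p) →
    ∃ (g' : List (List Int)) (N : List (Int × Int)),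
      rotLoopA (Q.length + fuel) (Q ++ tail) g f m rows cols
        = rotLoopA fuel (tail ++ N) g' (f - (N.length : Int)) m rows cols ∧
      N.Nodup ∧ Shape rows cols g' ∧
      (∀ p : Int × Int, p ∈ N ↔ inb rows cols p ∧ getCell g p.1 p.2 = 1 ∧ ∃ q ∈ Q, adjd q p) ∧
      (∀ p : Int × Int, inb rows cols p →
        ((getCell g p.1 p.2 = 1 ∧ ∃ q ∈ Q, adjd q p) → getCell g' p.1 p.2 = 2) ∧
        (¬ (getCell g p.1 p.2 = 1 ∧ ∃ q ∈ Q, adjd q p) →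
          getCell g' p.1 p.2 = getCell g p.1 p.2)) := by
  intro Q
  induction Q with
  | nil =>
    intro g f m tail fuel hS _
    refine ⟨g, [], by simp, List.nodup_nil, hS, ?_, ?_⟩
    · intro p
      constructor
      · intro h; simp at h
      · rintro ⟨_, _, q, hq, _⟩; simp at hq
    · intro p _
      refine ⟨?_, fun _ => rfl⟩
      rintro ⟨_, q, hq, _⟩
      simp at hq
  | cons x Q ih =>
    intro g f m tail fuel hS hQ
    obtain ⟨rx, cx⟩ := x
    have hxin : inb rows cols (rx, cx) := hQ _ List.mem_cons_self
    have hne : ¬ (rx = -1) := by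
      have := hxin.1
      simp only at this
      omega
    obtain ⟨g1, A1, heq1, hnd1, hS1, hmem1, hchar1⟩ :=
      foldDirs_spec rows cols rx cx rotDirections g f (Q ++ tail) hS
    have hunf : rotLoopA (((rx, cx) :: Q).length + fuel) (((rx, cx) :: Q) ++ tail) g f m rows cols
        = rotLoopA (Q.length + fuel) (Q ++ (tail ++ A1)) g1 (f - (A1.length : Int)) m rows cols := by
      rw [show ((rx, cx) :: Q).length + fuel = (Q.length + fuel) + 1 by
        simp [Nat.add_right_comm]]
      rw [List.cons_append, rotLoopA]
      rw [if_neg hne]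
      simp only [heq1]
      rw [List.append_assoc]
    have hg1mem : ∀ p : Int × Int, p ∈ A1 ↔
        inb rows cols p ∧ getCell g p.1 p.2 = 1 ∧ adjd (rx, cx) p := by
      intro p
      rw [hmem1 p]
      rfl
    have hg1one : ∀ p : Int × Int, inb rows cols p →
        (getCell g1 p.1 p.2 = 1 ↔ getCell g p.1 p.2 = 1 ∧ ¬ adjd (rx, cx) p) := by
      intro p hpi
      obtain ⟨hc1, hc2⟩ := hchar1 p hpi
      by_cases ha : adjd (rx, cx) p
      · by_cases hv : getCell g p.1 p.2 = 1
        · rw [hc1 ⟨hv, ha⟩]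
          constructor
          · intro h; exact absurd h (by norm_num)
          · rintro ⟨_, h⟩; exact absurd ha h
        · rw [hc2 (by rintro ⟨h, _⟩; exact hv h)]
          constructor
          · intro h; exact absurd h hv
          · rintro ⟨h, _⟩; exact absurd h hv
      · rw [hc2 (by rintro ⟨_, h⟩; exact ha h)]
        constructor
        · intro h; exact ⟨h, ha⟩
        · rintro ⟨h, _⟩; exact h
    obtain ⟨g', N', heq2, hnd2, hS2, hmem2, hchar2⟩ :=
      ih g1 (f - (A1.length : Int)) m (tail ++ A1) fuel hS1
        (fun p hp => hQ p (List.mem_cons_of_mem _ hp))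
    refine ⟨g', A1 ++ N', ?_, ?_, hS2, ?_, ?_⟩
    · rw [hunf, heq2, List.append_assoc]
      have : f - (A1.length : Int) - (N'.length : Int) = f - ((A1 ++ N').length : Int) := by
        simp only [List.length_append]
        push_cast
        ring
      rw [this]
    · refine List.Nodup.append hnd1 hnd2 ?_
      intro p hpA hpN
      obtain ⟨hpi, hpv, hpa⟩ := (hg1mem p).mp hpA
      have h2 : getCell g1 p.1 p.2 = 2 := (hchar1 p hpi).1 ⟨hpv, hpa⟩
      have h1 : getCell g1 p.1 p.2 = 1 := ((hmem2 p).mp hpN).2.1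
      rw [h2] at h1
      exact absurd h1 (by norm_num)
    · intro p
      simp only [List.mem_append, hg1mem p, hmem2 p]
      constructor
      · rintro (⟨hpi, hpv, hpa⟩ | ⟨hpi, hpv, q, hq, hqa⟩)
        · exact ⟨hpi, hpv, (rx, cx), List.mem_cons_self, hpa⟩
        · rw [hg1one p hpi] at hpv
          exact ⟨hpi, hpv.1, q, List.mem_cons_of_mem _ hq, hqa⟩
      · rintro ⟨hpi, hpv, q, hq, hqa⟩
        by_cases hpa : adjd (rx, cx) p
        · exact Or.inl ⟨hpi, hpv, hpa⟩
        · rcases List.mem_cons.mp hq with rfl | hq'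
          · exact absurd hqa hpa
          · exact Or.inr ⟨hpi, (hg1one p hpi).mpr ⟨hpv, hpa⟩, q, hq', hqa⟩
    · intro p hpi
      obtain ⟨hc1, hc2⟩ := hchar1 p hpi
      obtain ⟨hd1, hd2⟩ := hchar2 p hpi
      constructor
      · rintro ⟨hpv, q, hq, hqa⟩
        by_cases hpa : adjd (rx, cx) p
        · have h2 : getCell g1 p.1 p.2 = 2 := hc1 ⟨hpv, hpa⟩
          have : ¬ (getCell g1 p.1 p.2 = 1 ∧ ∃ q ∈ Q, adjd q p) := by
            rintro ⟨h, _⟩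
            rw [h2] at h
            exact absurd h (by norm_num)
          rw [hd2 this]
          exact h2
        · rcases List.mem_cons.mp hq with rfl | hq'
          · exact absurd hqa hpa
          · exact hd1 ⟨(hg1one p hpi).mpr ⟨hpv, hpa⟩, q, hq', hqa⟩
      · intro hn
        have hpv1 : ¬ (getCell g p.1 p.2 = 1 ∧ adjd (rx, cx) p) := by
          rintro ⟨hv, ha⟩
          exact hn ⟨hv, (rx, cx), List.mem_cons_self, ha⟩
        have hg1p : getCell g1 p.1 p.2 = getCell g p.1 p.2 := hc2 hpv1
        have : ¬ (getCell g1 p.1 p.2 = 1 ∧ ∃ q ∈ Q, adjd q p) := by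
          rintro ⟨hv, q, hq, hqa⟩
          rw [hg1p] at hv
          exact hn ⟨hv, q, List.mem_cons_of_mem _ hq, hqa⟩
        rw [hd2 this, hg1p]

lemma neg_mem_rotDirections (d : Int × Int) (hd : d ∈ rotDirections) :
    ((-d.1, -d.2) : Int × Int) ∈ rotDirections := by
  fin_cases hd <;> decide

lemma adjd_symm (q p : Int × Int) (h : adjd q p) : adjd p q := by
  obtain ⟨d, hd, rfl⟩ := h
  refine ⟨(-d.1, -d.2), neg_mem_rotDirections d hd, ?_⟩
  simp

-- the main simulation: one BFS level of A = one full-scan round of B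
lemma mainSim (rows cols : Int) :
    ∀ (n : Nat) (gA gB : List (List Int)) (Q : List (Int × Int)) (f m : Int)
      (fuelA fuelB : Nat),
    onesG rows cols gA = n →
    Shape rows cols gA → Shape rows cols gB → EqOn rows cols gA gB →
    (∀ p ∈ Q, inb rows cols p) →
    (∀ p ∈ Q, getCell gA p.1 p.2 = 2) →
    (∀ p, inb rows cols p → getCell gA p.1 p.2 = 2 → p ∉ Q →
      ∀ q, inb rows cols q → adjd p q → getCell gA q.1 q.2 ≠ 1) →
    fuelA ≥ Q.length + 2 * n + 2 → fuelB ≥ n + 1 →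
    rotLoopA fuelA (Q ++ [(-1, -1)]) gA f m rows cols
      = rotLoopB fuelB gB f (m + 1) rows cols := by
  intro n
  induction n using Nat.strong_induction_on with
  | _ n ihn =>
  intro gA gB Q f m fuelA fuelB hones hSA hSB hE hQ hQ2 hInv hfA hfB
  obtain ⟨g', N, heq, hnd, hS', hmem, hchar⟩ :=
    processRound rows cols Q gA f m [(-1, -1)] (fuelA - Q.length) hSA hQ
  rw [show fuelA = Q.length + (fuelA - Q.length) by omega, heq]
  -- the cells B's scan finds are exactly the cells A rotted this round
  have hscanN : ∀ p : Int × Int, p ∈ scanNewly gB rows cols ↔ p ∈ N := by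
    intro p
    rw [mem_scanNewly, hmem]
    constructor
    · rintro ⟨hpi, hpv, d, hd, hqi, hqv⟩
      have hpvA : getCell gA p.1 p.2 = 1 := by rw [hE p hpi]; exact hpv
      refine ⟨hpi, hpvA, ?_⟩
      have hqvA : getCell gA (p.1 + d.1) (p.2 + d.2) = 2 := by
        have := hE (p.1 + d.1, p.2 + d.2) hqi
        simp only at this
        rw [this]; exact hqv
      have hadj : adjd p (p.1 + d.1, p.2 + d.2) := ⟨d, hd, rfl⟩
      by_cases hqQ : (p.1 + d.1, p.2 + d.2) ∈ Q
      · exact ⟨_, hqQ, adjd_symm p _ hadj⟩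
      · exact absurd hpvA
          (hInv _ hqi hqvA hqQ p hpi (adjd_symm p _ hadj))
    · rintro ⟨hpi, hpv, q, hq, hqa⟩
      have hqi : inb rows cols q := hQ q hq
      have hqv2 : getCell gB q.1 q.2 = 2 := by rw [← hE q hqi]; exact hQ2 q hq
      obtain ⟨d, hd, hqd⟩ := adjd_symm q p hqa
      refine ⟨hpi, by rw [← hE p hpi]; exact hpv, d, hd, hqd ▸ hqi, ?_⟩
      have := hqv2
      rw [hqd] at this
      simpa using this
  have hndS := nodup_scanNewly rows cols gB
  have hpermN : (scanNewly gB rows cols).Perm N :=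
    (List.perm_ext_iff_of_nodup hndS hnd).mpr hscanN
  have hlenN : (scanNewly gB rows cols).length = N.length := hpermN.length_eq
  -- pop the sentinel
  obtain ⟨fr, hfr⟩ : ∃ k, fuelA - Q.length = k + 1 := ⟨fuelA - Q.length - 1, by omega⟩
  rw [hfr]
  obtain ⟨fb, hfb⟩ : ∃ k, fuelB = k + 1 := ⟨fuelB - 1, by omega⟩
  rw [hfb]
  by_cases hN : N = []
  · -- nothing rotted: both terminate
    subst hN
    rw [show ([(-1, -1)] ++ ([] : List (Int × Int))) = [((-1 : Int), (-1 : Int))] by simp]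
    rw [rotLoopA]
    rw [if_pos rfl, if_neg (by simp)]
    rw [rotLoopB]
    have hse : scanNewly gB rows cols = [] := by
      rw [← List.length_eq_zero_iff, hlenN]
      simp
    simp only [hse]
    cases fr <;> simp [rotLoopA]
  · -- a round happened: recurse
    have hse : scanNewly gB rows cols ≠ [] := by
      intro h
      rw [← List.length_eq_zero_iff, hlenN] at h
      exact hN (List.length_eq_zero_iff.mp h)
    rw [show ([(-1, -1)] ++ N) = (((-1 : Int), (-1 : Int)) :: N) by simp]
    rw [rotLoopA]
    rw [if_pos rfl, if_pos hN]
    rw [rotLoopB]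
    simp only [if_neg hse]
    -- facts about the new states
    have hNinb : ∀ p ∈ N, inb rows cols p := fun p hp => ((hmem p).mp hp).1
    have hNrot : ∀ p ∈ N, getCell g' p.1 p.2 = 2 := by
      intro p hp
      obtain ⟨hpi, hpv, hpq⟩ := (hmem p).mp hp
      exact (hchar p hpi).1 ⟨hpv, hpq⟩
    have hones' : onesG rows cols g' + N.length = n := by
      rw [← hones]
      refine onesG_flip rows cols gA g' N hnd
        (fun p hp => ⟨((hmem p).mp hp).1, ((hmem p).mp hp).2.1⟩) ?_
      intro p hpi
      by_cases hp : p ∈ N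
      · rw [if_pos hp]
        exact hNrot p hp
      · rw [if_neg hp]
        refine (hchar p hpi).2 ?_
        intro hc
        exact hp ((hmem p).mpr ⟨hpi, hc⟩)
    have hNlen1 : 1 ≤ N.length := by
      cases N with
      | nil => exact absurd rfl hN
      | cons a l => simp
    obtain ⟨hSB', hrotB⟩ := rotAll_spec rows cols (scanNewly gB rows cols) gB hSB
      (fun p hp => ((mem_scanNewly rows cols gB p).mp hp).1)
    have hE' : EqOn rows cols g' (rotAll gB (scanNewly gB rows cols)) := by
      intro p hpi
      rw [hrotB p hpi.1 hpi.2.2.1]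
      by_cases hp : p ∈ N
      · rw [if_pos ((hscanN p).mpr hp)]
        exact hNrot p hp
      · rw [if_neg (fun h => hp ((hscanN p).mp h))]
        rw [(hchar p hpi).2 (fun hc => hp ((hmem p).mpr ⟨hpi, hc⟩))]
        exact hE p hpi
    have hInv' : ∀ p, inb rows cols p → getCell g' p.1 p.2 = 2 → p ∉ N →
        ∀ q, inb rows cols q → adjd p q → getCell g' q.1 q.2 ≠ 1 := by
      intro p hpi hpv hpN q hqi hadj hqv
      have hqA : getCell gA q.1 q.2 = 1 ∧ ¬ (getCell gA q.1 q.2 = 1 ∧ ∃ x ∈ Q, adjd x q) := by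
        by_cases hc : getCell gA q.1 q.2 = 1 ∧ ∃ x ∈ Q, adjd x q
        · rw [(hchar q hqi).1 hc] at hqv
          exact absurd hqv (by norm_num)
        · rw [(hchar q hqi).2 hc] at hqv
          exact ⟨hqv, hc⟩
      have hpA : getCell gA p.1 p.2 = 2 := by
        by_cases hc : getCell gA p.1 p.2 = 1 ∧ ∃ x ∈ Q, adjd x p
        · exact absurd ((hmem p).mpr ⟨hpi, hc⟩) hpN
        · rw [← (hchar p hpi).2 hc]
          exact hpv
      by_cases hpQ : p ∈ Q
      · exact hqA.2 ⟨hqA.1, p, hpQ, hadj⟩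
      · exact hInv p hpi hpA hpQ q hqi hadj hqA.1
    have hrw : f - (N.length : Int) = f - ((scanNewly gB rows cols).length : Int) := by
      rw [hlenN]
    rw [hrw]
    have := ihn (onesG rows cols g') (by omega) g' (rotAll gB (scanNewly gB rows cols)) N
      (f - ((scanNewly gB rows cols).length : Int)) (m + 1) fr fb rfl hS' hSB' hE'
      hNinb hNrot hInv' (by omega) (by omega)
    exact this

lemma length_posL (rows cols : Int) :
    (posL rows cols).length = rows.toNat * cols.toNat := by
  rw [posL, List.length_flatMap]
  simp only [List.map_map, Function.comp_def, List.length_map, PySem.List.length_pyRange_one]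
  rw [List.map_const', List.sum_replicate, smul_eq_mul, PySem.List.length_pyRange_one]
  simp [Nat.mul_comm]

-- ===== VERDICT (by name: the statement is the Claim_ definition above) =====
theorem minutes_took_for_all_to_rot_spec : Claim_equal_minutes_took_for_all_to_rot := by
  intro grid _ hPre
  obtain ⟨hne, hrowsP⟩ := hPre
  unfold Spec_minutes_took_for_all_to_rot
  simp only [minutes_took_for_all_to_rot, minutes_took_for_all_to_rot_alt]
  have hgd0 : PySem.List.pyGetD grid 0 [] = grid.headD [] := by
    rw [PySem.List.pyGetD_zero]
    cases grid with
    | nil => rfl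
    | cons h t => rfl
  have hshape : Shape (grid.length : Int) ((PySem.List.pyGetD grid 0 []).length : Int) grid := by
    refine ⟨rfl, ?_⟩
    intro row hrow
    have := hrowsP row hrow
    rw [hgd0]
    exact_mod_cast this
  have hscan := scanInitA_spec (grid.length : Int) ((PySem.List.pyGetD grid 0 []).length : Int) grid
  have hfreshB := scanFreshB_spec (grid.length : Int) ((PySem.List.pyGetD grid 0 []).length : Int) grid
  rw [hscan.2, hfreshB]
  have hnb : onesG (grid.length : Int) ((PySem.List.pyGetD grid 0 []).length : Int) grid
      ≤ grid.length * (PySem.List.pyGetD grid 0 []).length := by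
    have h1 := List.countP_le_length
      (p := fun p : Int × Int => getCell grid p.1 p.2 == 1)
      (l := posL (grid.length : Int) ((PySem.List.pyGetD grid 0 []).length : Int))
    have h2 := length_posL (grid.length : Int) ((PySem.List.pyGetD grid 0 []).length : Int)
    simp only [Int.toNat_natCast] at h2
    rw [onesG]
    omega
  have key := mainSim (grid.length : Int) ((PySem.List.pyGetD grid 0 []).length : Int)
    (onesG (grid.length : Int) ((PySem.List.pyGetD grid 0 []).length : Int) grid)
    grid grid
    (scanInitA grid (grid.length : Int) ((PySem.List.pyGetD grid 0 []).length : Int)).1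
    ((onesG (grid.length : Int) ((PySem.List.pyGetD grid 0 []).length : Int) grid : Nat) : Int)
    (-1)
    (2 * grid.length * (PySem.List.pyGetD grid 0 []).length +
      ((scanInitA grid (grid.length : Int) ((PySem.List.pyGetD grid 0 []).length : Int)).1
        ++ [((-1 : Int), (-1 : Int))]).length + 2)
    ((onesG (grid.length : Int) ((PySem.List.pyGetD grid 0 []).length : Int) grid) + 1)
    rfl hshape hshape (fun p _ => rfl)
    (fun p hp => ((hscan.1 p).mp hp).1)
    (fun p hp => ((hscan.1 p).mp hp).2)
    (fun p hpi hp2 hpQ => absurd ((hscan.1 p).mpr ⟨hpi, hp2⟩) hpQ)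
    (by
      have hmul : 2 * grid.length * (PySem.List.pyGetD grid 0 []).length
          = 2 * (grid.length * (PySem.List.pyGetD grid 0 []).length) := by ring
      simp only [List.length_append, List.length_cons, List.length_nil, hmul]
      omega)
    (by omega)
  simp only [Int.toNat_natCast, List.length_append, List.length_cons, List.length_nil]
  norm_num at key
  exact key
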